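-- pv_equiv track=rewrite | github.com/YunYun501/Lazy-Learn-V2 | backend/app/services/pdf_parser.py | _fixup_zero_pages
-- ===== SOURCE A (Python) =====
-- def _fixup_zero_pages(toc_entries: list[dict]) -> list[dict]:
--     """Repair entries with page=0 by inferring from the next valid entry."""
--     fixed = [dict(e) for e in toc_entries]
--     for i, entry in enumerate(fixed):
--         if entry.get('page', 0) > 0:
--             continue
--         # Look forward for the first entry with a valid page
--         for j in range(i + 1, len(fixed)):
--             if fixed[j].get('page', 0) > 0:
--                 entry['page'] = fixed[j]['page']
--                 break
--     return fixed
-- ===== SOURCE B (Python) =====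
-- def _fixup_zero_pages(toc_entries: list[dict]) -> list[dict]:
--     """Repair entries with page=0 by inferring from the next valid entry.
--
--     Single backward pass tracking the nearest following valid page."""
--     fixed = []
--     nxt = None
--     for e in reversed(toc_entries):
--         e = dict(e)
--         p = e.get('page', 0)
--         if p > 0:
--             nxt = p
--         elif nxt is not None:
--             e['page'] = nxt
--         fixed.append(e)
--     fixed.reverse()
--     return fixed
-- ===== Notes on version B (the rewrite author's own statement) =====
-- stated objective: alternative
-- what changed: Replaced the forward scan with a nested look-ahead loop by a single backward pass that threads the nearest following valid page, eliminating the inner scan.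
import Mathlib
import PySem

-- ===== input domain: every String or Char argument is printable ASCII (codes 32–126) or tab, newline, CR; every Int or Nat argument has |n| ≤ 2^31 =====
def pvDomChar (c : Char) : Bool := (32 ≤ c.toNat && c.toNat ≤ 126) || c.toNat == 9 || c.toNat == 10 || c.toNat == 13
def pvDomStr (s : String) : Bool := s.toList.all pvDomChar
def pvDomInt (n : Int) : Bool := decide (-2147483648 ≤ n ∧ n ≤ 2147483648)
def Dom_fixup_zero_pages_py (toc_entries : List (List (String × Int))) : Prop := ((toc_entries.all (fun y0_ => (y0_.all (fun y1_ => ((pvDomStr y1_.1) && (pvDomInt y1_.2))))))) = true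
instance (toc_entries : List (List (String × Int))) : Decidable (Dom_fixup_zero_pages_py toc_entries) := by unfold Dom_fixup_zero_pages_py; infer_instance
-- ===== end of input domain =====

-- B replaces A's nested forward look-ahead by one backward pass threading the nearest
-- following valid page, eliminating the inner scan (objective: alternative).

-- ===== PORT A =====
-- entry.get('page', 0)
def pvPageA (d : PySem.Dict String Int) : Int := PySem.Dict.getD d "page" 0

-- inner loop 'for j in range(i+1, len(fixed))': first following entry with a valid
-- page; returns fixed[j]['page'] (the key is present there since the value is > 0)
def pvScanA : List (PySem.Dict String Int) → Option Int
  | [] => none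
  | e :: rest => if pvPageA e > 0 then some (PySem.Dict.getD e "page" 0) else pvScanA rest

-- outer loop 'for i, entry in enumerate(fixed)': entries after i are still unmodified
-- when scanned, so the recursion scans the original tail
def pvGoA : List (PySem.Dict String Int) → List (PySem.Dict String Int)
  | [] => []
  | e :: rest =>
    (if pvPageA e > 0 then e
     else match pvScanA rest with
       | some p => PySem.Dict.insert e "page" p
       | none => e) :: pvGoA rest

def fixup_zero_pages_py (toc_entries : List (List (String × Int))) : List (List (String × Int)) :=
  -- fixed = [dict(e) for e in toc_entries]
  (pvGoA (toc_entries.map (fun l => PySem.Dict.ofList l))).map (fun d => d.items)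

-- ===== PORT B =====
-- reversed loop threading nxt, the nearest following valid page; returns the fixed
-- list (in original order) together with nxt
def pvGoB : List (PySem.Dict String Int) → List (PySem.Dict String Int) × Option Int
  | [] => ([], none)
  | e :: rest =>
    let r := pvGoB rest
    let p := PySem.Dict.getD e "page" 0
    if p > 0 then (e :: r.1, some p)
    else ((match r.2 with
            | some q => PySem.Dict.insert e "page" q
            | none => e) :: r.1, r.2)

def fixup_zero_pages_py_alt (toc_entries : List (List (String × Int))) : List (List (String × Int)) :=
  ((pvGoB (toc_entries.map (fun l => PySem.Dict.ofList l))).1).map (fun d => d.items)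

-- ===== PRECONDITION & SPEC =====
def Spec_fixup_zero_pages_py (toc_entries : List (List (String × Int))) (out : List (List (String × Int))) : Prop := out = fixup_zero_pages_py_alt toc_entries
instance (toc_entries : List (List (String × Int))) (out : List (List (String × Int))) : Decidable (Spec_fixup_zero_pages_py toc_entries out) := by unfold Spec_fixup_zero_pages_py; infer_instance

-- ===== CLAIM (what is proved, stated in full; the proofs are below) =====
def Claim_equal_fixup_zero_pages_py : Prop := ∀ (toc_entries : List (List (String × Int))), Dom_fixup_zero_pages_py toc_entries → Spec_fixup_zero_pages_py toc_entries (fixup_zero_pages_py toc_entries)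

-- ===== LEMMAS AND PROOFS =====
theorem pvGoB_snd (xs : List (PySem.Dict String Int)) : (pvGoB xs).2 = pvScanA xs := by
  induction xs with
  | nil => rfl
  | cons e rest ih =>
    simp only [pvGoB, pvScanA, pvPageA]
    split_ifs <;> simp [ih]

theorem pvGoB_fst (xs : List (PySem.Dict String Int)) : (pvGoB xs).1 = pvGoA xs := by
  induction xs with
  | nil => rfl
  | cons e rest ih =>
    simp only [pvGoB, pvGoA, pvPageA, pvGoB_snd rest]
    split_ifs <;> simp [ih]

-- ===== VERDICT (by name: the statement is the Claim_ definition above) =====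
theorem fixup_zero_pages_py_spec : Claim_equal_fixup_zero_pages_py := by
  intro toc _
  unfold Spec_fixup_zero_pages_py fixup_zero_pages_py fixup_zero_pages_py_alt
  rw [pvGoB_fst]
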